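-- pv_equiv track=rewrite | github.com/bellDev-code/Challenge_Algorithm | programmers/Ohsulgi/today04/03-todayChallenge.py | solution
-- ===== SOURCE A (Python) =====
-- def solution(arr, n):
--     answer = []
--     if len(arr) % 2 == 1:
--         for i in range(len(arr)):
--             if i % 2 == 0:
--                 answer.append(arr[i] + n)
--             else:
--                 answer.append(arr[i])
--     else:
--         for j in range(len(arr)):
--             if j % 2 == 1:
--                 answer.append(arr[j] + n)
--             else:
--                 answer.append(arr[j])
--     return answer
-- ===== SOURCE B (Python) =====
-- def solution(arr, n):
--     start = 0 if len(arr) % 2 == 1 else 1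
--     answer = list(arr)
--     for i in range(start, len(arr), 2):
--         answer[i] = answer[i] + n
--     return answer
-- ===== Notes on version B (the rewrite author's own statement) =====
-- stated objective: simpler
-- what changed: B computes the affected parity once, copies the list, and does a strided range(start, len, 2) update of only the touched positions, instead of A's two full per-element loops each testing index parity.
import Mathlib
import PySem

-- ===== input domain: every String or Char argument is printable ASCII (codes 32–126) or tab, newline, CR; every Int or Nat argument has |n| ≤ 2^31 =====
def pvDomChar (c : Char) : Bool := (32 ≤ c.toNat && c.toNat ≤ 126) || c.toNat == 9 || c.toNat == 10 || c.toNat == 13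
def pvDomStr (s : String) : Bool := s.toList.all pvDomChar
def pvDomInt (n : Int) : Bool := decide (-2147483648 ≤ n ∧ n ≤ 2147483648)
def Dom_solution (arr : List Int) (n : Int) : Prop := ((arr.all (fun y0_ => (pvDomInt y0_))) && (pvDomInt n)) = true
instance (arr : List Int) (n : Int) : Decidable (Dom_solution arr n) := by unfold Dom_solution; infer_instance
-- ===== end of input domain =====

-- B replaces A's two full parity-testing loops by a copy plus a strided update of only the
-- affected indices; objective: simpler (same O(n) cost).

-- ===== PORT A =====
def solution (arr : List Int) (n : Int) : List Int :=
  if (arr.length : Int) % 2 = 1 then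
    (PySem.List.pyRange 0 (arr.length : Int) 1).foldl
      (fun answer i =>
        if i % 2 = 0 then answer ++ [PySem.List.pyGetD arr i 0 + n]
        else answer ++ [PySem.List.pyGetD arr i 0]) []
  else
    (PySem.List.pyRange 0 (arr.length : Int) 1).foldl
      (fun answer j =>
        if j % 2 = 1 then answer ++ [PySem.List.pyGetD arr j 0 + n]
        else answer ++ [PySem.List.pyGetD arr j 0]) []

-- ===== PORT B =====
def solution_alt (arr : List Int) (n : Int) : List Int :=
  let start : Int := if (arr.length : Int) % 2 = 1 then 0 else 1
  (PySem.List.pyRange start (arr.length : Int) 2).foldl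
    (fun answer i => PySem.List.pySetD answer i (PySem.List.pyGetD answer i 0 + n)) arr

-- ===== PRECONDITION & SPEC =====
def Spec_solution (arr : List Int) (n : Int) (out : List Int) : Prop := out = solution_alt arr n
instance (arr : List Int) (n : Int) (out : List Int) : Decidable (Spec_solution arr n out) := by unfold Spec_solution; infer_instance

-- ===== CLAIM (what is proved, stated in full; the proofs are below) =====
def Claim_equal_solution : Prop := ∀ (arr : List Int) (n : Int), Dom_solution arr n → Spec_solution arr n (solution arr n)

-- ===== LEMMAS AND PROOFS =====

theorem foldSet_length (L : List Int) (xs : List Int) (n : Int) :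
    (L.foldl (fun ans i => PySem.List.pySetD ans i (PySem.List.pyGetD ans i 0 + n)) xs).length
      = xs.length := by
  induction L generalizing xs with
  | nil => rfl
  | cons i L ih =>
    simp only [List.foldl_cons]
    rw [ih, PySem.List.length_pySetD]

theorem foldSet_getElem (L : List Int) (xs : List Int) (n : Int)
    (hnd : L.Nodup) (hb : ∀ i ∈ L, 0 ≤ i ∧ i < (xs.length : Int)) (k : Nat) (hk : k < xs.length) :
    ∀ (h : k < (L.foldl (fun ans i => PySem.List.pySetD ans i (PySem.List.pyGetD ans i 0 + n)) xs).length),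
    (L.foldl (fun ans i => PySem.List.pySetD ans i (PySem.List.pyGetD ans i 0 + n)) xs)[k]
      = if (k : Int) ∈ L then xs[k] + n else xs[k] := by
  induction L generalizing xs with
  | nil => intro h; simp
  | cons i L ih =>
    intro h
    obtain ⟨hi0, hil⟩ := hb i (List.mem_cons_self ..)
    have hiN : i.toNat < xs.length := by omega
    have hset : PySem.List.pySetD xs i (PySem.List.pyGetD xs i 0 + n)
        = xs.set i.toNat (xs[i.toNat] + n) := by
      rw [PySem.List.pySetD_of_nonneg xs _ hi0, PySem.List.pyGetD_eq_getElem xs 0 hi0 hil]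
    simp only [List.foldl_cons, hset]
    have hb' : ∀ j ∈ L, 0 ≤ j ∧ j < ((xs.set i.toNat (xs[i.toNat] + n)).length : Int) := by
      intro j hj; simpa using hb j (List.mem_cons_of_mem _ hj)
    have hk' : k < (xs.set i.toNat (xs[i.toNat] + n)).length := by simpa using hk
    rw [ih _ hnd.of_cons hb' hk']
    have hgs : (xs.set i.toNat (xs[i.toNat] + n))[k]'hk'
        = if i.toNat = k then xs[i.toNat] + n else xs[k] := List.getElem_set hk'
    by_cases hkL : (k : Int) ∈ L
    · have hki : (k : Int) ≠ i := fun he => (List.nodup_cons.mp hnd).1 (he ▸ hkL)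
      have hne : ¬ (i.toNat = k) := by omega
      rw [if_pos hkL, hgs, if_neg hne, if_pos (List.mem_cons_of_mem _ hkL)]
    · by_cases hke : (k : Int) = i
      · have heq : i.toNat = k := by omega
        have hval : xs[i.toNat] = xs[k] := by simp [heq]
        rw [if_neg hkL, hgs, if_pos heq, if_pos (by simp [hke]), hval]
      · have hne : ¬ (i.toNat = k) := by omega
        rw [if_neg hkL, hgs, if_neg hne, if_neg (by simp [List.mem_cons, hke, hkL])]

theorem nodup_pyRange_pos (a b s : Int) (hs : 0 < s) :
    (PySem.List.pyRange a b s).Nodup := by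
  rw [PySem.List.pyRange_of_pos a b hs]
  refine List.Nodup.map ?_ (List.nodup_range)
  intro x y hxy
  have hx : a + s * (x : Int) = a + s * (y : Int) := hxy
  have hxy' : (x : Int) = y :=
    mul_left_cancel₀ (by omega : s ≠ 0) (by linarith : s * (x : Int) = s * (y : Int))
  exact_mod_cast hxy'

theorem solution_eq_map (arr : List Int) (n : Int) :
    solution arr n = (PySem.List.pyRange 0 (arr.length : Int) 1).map
      (fun i => if (if (arr.length : Int) % 2 = 1 then i % 2 = 0 else i % 2 = 1)
                then PySem.List.pyGetD arr i 0 + n else PySem.List.pyGetD arr i 0) := by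
  unfold solution
  by_cases hp : (arr.length : Int) % 2 = 1
  · rw [if_pos hp,
      PySem.List.foldl_congr_mem _ _
        (fun acc x => acc ++ [if x % 2 = 0 then PySem.List.pyGetD arr x 0 + n
                              else PySem.List.pyGetD arr x 0]) _
        (by intro acc x hx; by_cases hc : x % 2 = 0 <;> simp [hc]),
      PySem.List.foldl_append_singleton_eq_map]
    simp [hp]
  · rw [if_neg hp,
      PySem.List.foldl_congr_mem _ _
        (fun acc x => acc ++ [if x % 2 = 1 then PySem.List.pyGetD arr x 0 + n
                              else PySem.List.pyGetD arr x 0]) _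
        (by intro acc x hx; by_cases hc : x % 2 = 1 <;> simp [hc]),
      PySem.List.foldl_append_singleton_eq_map]
    simp [hp]

theorem alt_branch (arr : List Int) (n start : Int) (h0 : 0 ≤ start)
    (hpar : ∀ (k : Nat), k < arr.length →
      ((if (arr.length : Int) % 2 = 1 then ((0 : Int) + (k : Int)) % 2 = 0
        else ((0 : Int) + (k : Int)) % 2 = 1)
        ↔ (start ≤ (k : Int) ∧ (k : Int) < (arr.length : Int) ∧ (2 : Int) ∣ (k : Int) - start))) :
    (PySem.List.pyRange 0 (arr.length : Int) 1).map
      (fun i => if (if (arr.length : Int) % 2 = 1 then i % 2 = 0 else i % 2 = 1)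
                then PySem.List.pyGetD arr i 0 + n else PySem.List.pyGetD arr i 0)
    = (PySem.List.pyRange start (arr.length : Int) 2).foldl
        (fun answer i => PySem.List.pySetD answer i (PySem.List.pyGetD answer i 0 + n)) arr := by
  have hb : ∀ i ∈ PySem.List.pyRange start (arr.length : Int) 2, 0 ≤ i ∧ i < (arr.length : Int) := by
    intro i hi
    have := (PySem.List.mem_pyRange_iff_of_pos (by norm_num) i).mp hi
    omega
  apply List.ext_getElem
  · simp [PySem.List.length_pyRange_one, foldSet_length]
  · intro k h1' h2'
    have hklen : k < arr.length := by
      simpa [PySem.List.length_pyRange_one] using h1'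
    rw [List.getElem_map, PySem.List.getElem_pyRange_one,
      foldSet_getElem _ _ _ (nodup_pyRange_pos _ _ _ (by norm_num)) hb k hklen h2']
    have hget : PySem.List.pyGetD arr (0 + (k : Int)) 0 = arr[k] := by
      rw [zero_add, PySem.List.pyGetD_eq_getElem arr 0 (by omega) (by exact_mod_cast hklen)]
      simp
    have hmem : ((k : Int) ∈ PySem.List.pyRange start (arr.length : Int) 2)
        ↔ (start ≤ (k : Int) ∧ (k : Int) < (arr.length : Int) ∧ (2 : Int) ∣ (k : Int) - start) :=
      PySem.List.mem_pyRange_iff_of_pos (by norm_num) _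
    rw [hget]
    by_cases hc : (start ≤ (k : Int) ∧ (k : Int) < (arr.length : Int) ∧ (2 : Int) ∣ (k : Int) - start)
    · rw [if_pos ((hpar k hklen).mpr hc), if_pos (hmem.mpr hc)]
    · rw [if_neg (fun hh => hc ((hpar k hklen).mp hh)), if_neg (fun hh => hc (hmem.mp hh))]

-- ===== VERDICT (by name: the statement is the Claim_ definition above) =====
theorem solution_spec : Claim_equal_solution := by
  intro arr n _
  unfold Spec_solution
  rw [solution_eq_map]
  show _ = solution_alt arr n
  simp only [solution_alt]
  by_cases hp : (arr.length : Int) % 2 = 1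
  · rw [if_pos hp]
    apply alt_branch arr n 0 le_rfl
    intro k hklen
    rw [if_pos hp]
    constructor
    · intro hh
      refine ⟨by omega, by exact_mod_cast hklen, by omega⟩
    · intro ⟨_, _, hd⟩
      omega
  · rw [if_neg hp]
    apply alt_branch arr n 1 zero_le_one
    intro k hklen
    rw [if_neg hp]
    constructor
    · intro hh
      refine ⟨by omega, by exact_mod_cast hklen, by omega⟩
    · intro ⟨_, _, hd⟩
      omega
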